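-- pv_equiv track=rewrite | github.com/parallelno/guimos_jdundel | scripts/utils/common.py | bytes_to_asm
-- ===== SOURCE A (Python) =====
-- def bytes_to_asm(data, numbers_in_line = 16, add_empty_last_line = False):
-- 	asm = ""
-- 	for i, byte in enumerate(data):
-- 		if i % numbers_in_line == 0:
-- 			if i != 0:
-- 				asm += "\n"
-- 			asm += "			.byte "
-- 		asm += f"0x{byte:02X}, "
--
-- 	asm += "\n"
-- 	if add_empty_last_line:
-- 		asm += "\n"
-- 	return asm
-- ===== SOURCE B (Python) =====
-- def bytes_to_asm(data, numbers_in_line = 16, add_empty_last_line = False):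
-- 	chunks = [data[j:j + numbers_in_line] for j in range(0, len(data), numbers_in_line)]
-- 	lines = ["			.byte " + "".join(f"0x{b:02X}, " for b in chunk) for chunk in chunks]
-- 	out = "\n".join(lines) + "\n"
-- 	if add_empty_last_line:
-- 		out += "\n"
-- 	return out
-- ===== Notes on version B (the rewrite author's own statement) =====
-- stated objective: idiomatic
-- what changed: B splits the data into chunks of numbers_in_line bytes with a range-stepped slice comprehension, renders each chunk as one '.byte' line and joins the lines with '\n', instead of A's single accumulator loop that tests i % numbers_in_line on every element; Pre_ excludes numbers_in_line < 1, where A raises ZeroDivisionError (except on empty data) and any value A does return for a nonpositive line width is an accident of Python's modulus.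
-- outside the precondition, e.g. on bytes_to_asm([], 0, True): A returns '\n\n', B raises ValueError
import Mathlib
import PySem

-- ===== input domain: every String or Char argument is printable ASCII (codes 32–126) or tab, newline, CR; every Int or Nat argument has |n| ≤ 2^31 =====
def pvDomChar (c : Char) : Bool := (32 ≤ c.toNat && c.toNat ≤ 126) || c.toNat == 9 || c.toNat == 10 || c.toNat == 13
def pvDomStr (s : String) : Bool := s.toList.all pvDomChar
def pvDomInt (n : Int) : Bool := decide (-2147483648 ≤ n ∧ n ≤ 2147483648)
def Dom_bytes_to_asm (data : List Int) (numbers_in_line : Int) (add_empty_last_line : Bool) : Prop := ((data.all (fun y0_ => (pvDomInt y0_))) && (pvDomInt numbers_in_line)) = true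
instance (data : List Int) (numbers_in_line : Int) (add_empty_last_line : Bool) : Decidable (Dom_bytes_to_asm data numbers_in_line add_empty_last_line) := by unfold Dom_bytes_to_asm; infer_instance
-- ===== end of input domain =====

-- B chunks the data into lines with a range-stepped slice comprehension and joins them,
-- instead of A's index-modulus bookkeeping inside one accumulator loop (objective: more idiomatic).

-- shared helper: Python's f"0x{byte:02X}, " (uppercase hex, zero-padded to width 2 incl. sign)
def pvHexDigit (n : Nat) : Char := if n < 10 then Char.ofNat (48 + n) else Char.ofNat (55 + n)

def pvHexChars : Nat → List Char
  | 0 => []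
  | n + 1 => pvHexChars ((n + 1) / 16) ++ [pvHexDigit ((n + 1) % 16)]
decreasing_by exact Nat.div_lt_self (Nat.succ_pos n) (by omega)

def pvItem (b : Int) : String :=
  let body : List Char := if b.natAbs = 0 then ['0'] else pvHexChars b.natAbs
  let sign : List Char := if b < 0 then ['-'] else []
  "0x" ++ String.ofList (sign ++ List.replicate (2 - (sign.length + body.length)) '0' ++ body) ++ ", "

-- ===== PORT A =====
def bytes_to_asm (data : List Int) (numbers_in_line : Int) (add_empty_last_line : Bool) : String :=
  let asm := (PySem.List.enumerate data 0).foldl (fun asm p =>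
    let asm := if PySem.Int.mod p.1 numbers_in_line == 0 then
        (if p.1 != 0 then asm ++ "\n" else asm) ++ "\t\t\t.byte "
      else asm
    asm ++ pvItem p.2) ""
  let asm := asm ++ "\n"
  if add_empty_last_line then asm ++ "\n" else asm

-- ===== PORT B =====
-- one '.byte' line: "			.byte " + "".join(f"0x{b:02X}, " for b in chunk)
def pvLine (c : List Int) : String := "\t\t\t.byte " ++ PySem.Str.join "" (c.map pvItem)

def bytes_to_asm_alt (data : List Int) (numbers_in_line : Int) (add_empty_last_line : Bool) : String :=
  let chunks := (PySem.List.pyRange 0 (data.length : Int) numbers_in_line).map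
    (fun j => PySem.List.slice data (some j) (some (j + numbers_in_line)))
  let lines := chunks.map pvLine
  let out := PySem.Str.join "\n" lines ++ "\n"
  if add_empty_last_line then out ++ "\n" else out

-- ===== PRECONDITION & SPEC =====
-- Pre_ excludes numbers_in_line < 1: at 0 A raises ZeroDivisionError (except on empty data,
-- where B's zero range step raises ValueError), and a negative line width is a degenerate
-- corner on which the value A happens to return is an accident of Python's modulus sign.
def Pre_bytes_to_asm (data : List Int) (numbers_in_line : Int) (add_empty_last_line : Bool) : Prop :=
  1 ≤ numbers_in_line
instance (data : List Int) (numbers_in_line : Int) (add_empty_last_line : Bool) : Decidable (Pre_bytes_to_asm data numbers_in_line add_empty_last_line) := by unfold Pre_bytes_to_asm; infer_instance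

def pvWitness_bytes_to_asm : List Int × Int × Bool := ([0, 255, 17], 2, false)

def Spec_bytes_to_asm (data : List Int) (numbers_in_line : Int) (add_empty_last_line : Bool) (out : String) : Prop := out = bytes_to_asm_alt data numbers_in_line add_empty_last_line
instance (data : List Int) (numbers_in_line : Int) (add_empty_last_line : Bool) (out : String) : Decidable (Spec_bytes_to_asm data numbers_in_line add_empty_last_line out) := by unfold Spec_bytes_to_asm; infer_instance

-- ===== CLAIM (what is proved, stated in full; the proofs are below) =====
def Claim_equal_bytes_to_asm : Prop := ∀ (data : List Int) (numbers_in_line : Int) (add_empty_last_line : Bool), Dom_bytes_to_asm data numbers_in_line add_empty_last_line → Pre_bytes_to_asm data numbers_in_line add_empty_last_line → Spec_bytes_to_asm data numbers_in_line add_empty_last_line (bytes_to_asm data numbers_in_line add_empty_last_line)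

-- ===== LEMMAS AND PROOFS =====

-- string-level facts about PySem.Str.join
theorem pvJoin_nil (sep : String) : PySem.Str.join sep [] = "" := by
  apply String.toList_inj.mp
  simp [PySem.Str.toList_join, PySem.Chars.join_nil]

theorem pvJoin_single (sep a : String) : PySem.Str.join sep [a] = a := by
  apply String.toList_inj.mp
  simp [PySem.Str.toList_join, PySem.Chars.join_singleton]

theorem pvJoin_cons (sep a b : String) (l : List String) :
    PySem.Str.join sep (a :: b :: l) = a ++ sep ++ PySem.Str.join sep (b :: l) := by
  apply String.toList_inj.mp
  simp [PySem.Str.toList_join, PySem.Chars.join_cons_cons]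

theorem pvJoinE_cons (a : String) (l : List String) :
    PySem.Str.join "" (a :: l) = a ++ PySem.Str.join "" l := by
  cases l with
  | nil => rw [pvJoin_single, pvJoin_nil]; simp
  | cons b bs => rw [pvJoin_cons]; simp

theorem pv_nl_hdr : ("\n" : String) ++ "\t\t\t.byte " = "\n\t\t\t.byte " := by
  apply String.toList_inj.mp; simp

-- proof-side chunking: consecutive chunks of k bytes (k > 0)
def pvChunks : Nat → List Int → List (List Int)
  | _, [] => []
  | 0, _ :: _ => []
  | k + 1, x :: xs => ((x :: xs).take (k + 1)) :: pvChunks (k + 1) ((x :: xs).drop (k + 1))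
termination_by k l => l.length
decreasing_by simp

theorem pvChunks_nil (k : Nat) : pvChunks k [] = [] := by
  cases k <;> simp [pvChunks]

theorem pvChunks_cons (k : Nat) (x : Int) (xs : List Int) :
    pvChunks (k + 1) (x :: xs) = (x :: xs.take k) :: pvChunks (k + 1) (xs.drop k) := by
  rw [pvChunks]; simp

-- Nat-level form of B's comprehension: range-indexed drop/take produces pvChunks
theorem pvChunksNat (k : Nat) :
    (data : List Int) →
      (List.range ((data.length + k) / (k + 1))).map
        (fun m => (data.drop ((k + 1) * m)).take (k + 1)) = pvChunks (k + 1) data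
  | [] => by rw [pvChunks_nil]; simp [Nat.div_eq_of_lt (Nat.lt_succ_self k)]
  | x :: xs => by
      have h1 : ((x :: xs).length + k) / (k + 1) = xs.length / (k + 1) + 1 := by
        rw [List.length_cons]
        have h2 : xs.length + 1 + k = xs.length + (k + 1) := by omega
        rw [h2, Nat.add_div_right _ (Nat.succ_pos k)]
      have hc : ((xs.drop k).length + k) / (k + 1) = xs.length / (k + 1) := by
        rw [List.length_drop]
        by_cases h : k ≤ xs.length
        · rw [Nat.sub_add_cancel h]
        · rw [Nat.div_eq_of_lt (by omega), Nat.div_eq_of_lt (by omega)]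
      rw [h1, List.range_succ_eq_map, List.map_cons, List.map_map, pvChunks_cons]
      congr 1
      rw [← pvChunksNat k (xs.drop k), hc]
      apply List.map_congr_left
      intro m _
      simp only [Function.comp_apply]
      rw [show (k + 1) * (m + 1) = (k + 1) + (k + 1) * m by ring, ← List.drop_drop,
        List.drop_succ_cons]
  termination_by data => data.length
  decreasing_by simp

-- B's pyRange/slice comprehension computes pvChunks when the width is k+1
theorem pv_port_chunks (k : Nat) (data : List Int) :
    (PySem.List.pyRange 0 (data.length : Int) ((k : Int) + 1)).map
      (fun j => PySem.List.slice data (some j) (some (j + ((k : Int) + 1)))) =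
      pvChunks (k + 1) data := by
  rw [PySem.List.pyRange_of_pos _ _ (by omega), List.map_map]
  have hN : (if (0 : Int) < (data.length : Int) then
      (((data.length : Int) - 0 + ((k : Int) + 1) - 1) / ((k : Int) + 1)).toNat else 0)
      = (data.length + k) / (k + 1) := by
    by_cases h : 0 < data.length
    · rw [if_pos (by exact_mod_cast h)]
      rw [show ((data.length : Int) - 0 + ((k : Int) + 1) - 1) = ((data.length + k : Nat) : Int) by
        push_cast; ring]
      rw [show ((k : Int) + 1) = ((k + 1 : Nat) : Int) by push_cast; ring]
      rw [← Int.natCast_div]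
      exact Int.toNat_natCast _
    · rw [if_neg (by exact_mod_cast h)]
      have hz : data.length = 0 := by omega
      rw [hz]
      simp [Nat.div_eq_of_lt (Nat.lt_succ_self k)]
  rw [hN, ← pvChunksNat k data]
  apply List.map_congr_left
  intro m _
  simp only [Function.comp_apply]
  rw [show (0 : Int) + ((k : Int) + 1) * (m : Int) = (((k + 1) * m : Nat) : Int) by push_cast; ring]
  rw [show ((k : Int) + 1) = ((k + 1 : Nat) : Int) by push_cast; ring]
  rw [PySem.List.slice_natCast_add]

-- A's loop body (the fold function of the port of A)
def pvStep (n : Int) (asm : String) (p : Int × Int) : String :=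
  (if PySem.Int.mod p.1 n == 0 then
      (if p.1 != 0 then asm ++ "\n" else asm) ++ "\t\t\t.byte "
    else asm) ++ pvItem p.2

-- Python's 'i % n == 0' is divisibility by |n|
theorem pvStep_mod (n : Int) (i : Int) :
    (PySem.Int.mod i n == 0) = decide ((n.natAbs : Int) ∣ i) := by
  by_cases hd : (n.natAbs : Int) ∣ i
  · rw [decide_eq_true hd]
    exact beq_iff_eq.mpr ((PySem.Int.mod_eq_zero_iff_dvd i n).mpr (Int.natAbs_dvd.mp hd))
  · rw [decide_eq_false hd]
    refine beq_eq_false_iff_ne.mpr (fun h => hd ?_)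
    exact Int.natAbs_dvd.mpr ((PySem.Int.mod_eq_zero_iff_dvd i n).mp h)

-- folding over indices that are never at a chunk boundary just appends the items
theorem pv_inner (n : Int) (k : Nat) (hk : n.natAbs = k) :
    ∀ (c : List Int) (i : Int) (acc : String),
      (∀ m : Nat, m < c.length → ¬ ((k : Int) ∣ (i + m))) →
      (PySem.List.enumerate c i).foldl (pvStep n) acc =
        acc ++ PySem.Str.join "" (c.map pvItem) := by
  intro c
  induction c with
  | nil => intro i acc _; simp [PySem.List.enumerate_nil, pvJoin_nil]
  | cons x xs ih =>
    intro i acc h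
    rw [PySem.List.enumerate_cons]
    simp only [List.foldl_cons]
    have hx : ¬ ((k : Int) ∣ i) := by have := h 0 (by simp); simpa using this
    have hstep : pvStep n acc (i, x) = acc ++ pvItem x := by
      simp only [pvStep, pvStep_mod, hk]
      rw [decide_eq_false hx]; simp
    rw [hstep, ih (i + 1) (acc ++ pvItem x) (by
      intro m hm
      have := h (m + 1) (by simpa using Nat.succ_lt_succ hm)
      convert this using 2
      push_cast; ring)]
    rw [List.map_cons, pvJoinE_cons, String.append_assoc]

-- main invariant: from a positive chunk-boundary index, A's loop appends "\n"-prefixed lines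
theorem pv_main (n : Int) (k : Nat) (hk : n.natAbs = k + 1) :
    (data : List Int) → (i : Int) → (acc : String) → 0 < i → (((k : Int) + 1) ∣ i) →
      (PySem.List.enumerate data i).foldl (pvStep n) acc =
        acc ++ PySem.Str.join "" ((pvChunks (k + 1) data).map (fun c => "\n" ++ pvLine c))
  | [], i, acc, _, _ => by simp [PySem.List.enumerate_nil, pvChunks_nil, pvJoin_nil]
  | x :: xs, i, acc, hpos, hdvd => by
      rw [PySem.List.enumerate_cons]
      simp only [List.foldl_cons]
      have hstep : pvStep n acc (i, x) = acc ++ "\n" ++ "\t\t\t.byte " ++ pvItem x := by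
        simp only [pvStep, pvStep_mod, hk]
        rw [decide_eq_true (by push_cast at hdvd ⊢; exact hdvd)]
        have : (i != 0) = true := by simp [bne_iff_ne]; omega
        rw [this]; simp [String.append_assoc]
      rw [hstep]
      conv_lhs => rw [show xs = xs.take k ++ xs.drop k from (List.take_append_drop k xs).symm]
      rw [PySem.List.enumerate_append, List.foldl_append]
      have hnb : ∀ m : Nat, m < (xs.take k).length → ¬ ((((k : Nat) + 1 : Nat) : Int) ∣ (i + 1 + m)) := by
        intro m hm hdm
        have hmk : m < k := lt_of_lt_of_le hm (by simpa using List.length_take_le k xs)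
        push_cast at hdm hdvd
        have h1 : ((k : Int) + 1) ∣ ((m : Int) + 1) := by
          have : ((m : Int) + 1) = (i + 1 + m) - i := by ring
          rw [this]; exact Int.dvd_sub hdm hdvd
        have := Int.le_of_dvd (by omega) h1
        omega
      rw [pv_inner n (k + 1) hk (xs.take k) (i + 1) _ hnb]
      rw [pvChunks_cons]
      by_cases hd : xs.drop k = []
      · rw [hd]
        simp [PySem.List.enumerate_nil, pvChunks_nil, pvJoin_nil, pvJoinE_cons, pvLine,
          ← String.append_assoc]
        rw [String.append_assoc, pv_nl_hdr]
      · have hlen : (xs.drop k).length < (x :: xs).length := by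
          simp
        have htk : (xs.take k).length = k := by
          rw [List.length_take]
          have : k ≤ xs.length := by
            by_contra hcon
            exact hd (List.drop_eq_nil_of_le (by omega))
          omega
        rw [pv_main n k hk (xs.drop k) (i + 1 + (xs.take k).length) _
          (by omega)
          (by rw [htk]
              push_cast at hdvd ⊢
              have he : i + 1 + (k : Int) = i + ((k : Int) + 1) := by ring
              rw [he]; exact dvd_add hdvd dvd_rfl)]
        rw [List.map_cons, pvJoinE_cons]
        simp [pvLine, pvJoinE_cons, ← String.append_assoc]
        rw [String.append_assoc, pv_nl_hdr]
  termination_by data _ _ _ _ => data.length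
  decreasing_by simp

-- start of the loop: index 0, empty accumulator, first line has no leading "\n"
theorem pv_start (n : Int) (k : Nat) (hk : n.natAbs = k + 1) (data : List Int) :
    (PySem.List.enumerate data 0).foldl (pvStep n) "" =
      PySem.Str.join "\n" ((pvChunks (k + 1) data).map pvLine) := by
  match data with
  | [] => simp [PySem.List.enumerate_nil, pvChunks, pvJoin_nil]
  | x :: xs =>
    rw [PySem.List.enumerate_cons]
    simp only [List.foldl_cons]
    have hstep : pvStep n "" ((0 : Int), x) = "\t\t\t.byte " ++ pvItem x := by
      simp only [pvStep, pvStep_mod, hk]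
      rw [decide_eq_true ⟨0, by ring⟩]
      simp
    rw [hstep]
    conv_lhs => rw [show xs = xs.take k ++ xs.drop k from (List.take_append_drop k xs).symm]
    rw [PySem.List.enumerate_append, List.foldl_append]
    have hnb : ∀ m : Nat, m < (xs.take k).length → ¬ ((((k : Nat) + 1 : Nat) : Int) ∣ ((0 : Int) + 1 + m)) := by
      intro m hm hdm
      have hmk : m < k := lt_of_lt_of_le hm (by simpa using List.length_take_le k xs)
      push_cast at hdm
      rw [add_comm] at hdm
      have := Int.le_of_dvd (by omega) hdm
      omega
    rw [pv_inner n (k + 1) hk (xs.take k) (0 + 1) _ hnb]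
    rw [pvChunks_cons]
    have hjoin : ∀ (ls : List (List Int)) (c : List Int),
        PySem.Str.join "\n" ((c :: ls).map pvLine) =
          pvLine c ++ PySem.Str.join "" (ls.map (fun d => "\n" ++ pvLine d)) := by
      intro ls
      induction ls with
      | nil => intro c; simp [pvJoin_single, pvJoin_nil]
      | cons d ds ihd =>
        intro c
        have ih2 := ihd d
        rw [List.map_cons] at ih2
        rw [List.map_cons, List.map_cons, pvJoin_cons, ih2, List.map_cons, pvJoinE_cons]
        simp [String.append_assoc]
    rw [hjoin]
    by_cases hd : xs.drop k = []
    · rw [hd]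
      simp [PySem.List.enumerate_nil, pvChunks_nil, pvJoin_nil, pvJoinE_cons, pvLine,
        String.append_assoc]
    · have htk : (xs.take k).length = k := by
        rw [List.length_take]
        have : k ≤ xs.length := by
          by_contra hcon
          exact hd (List.drop_eq_nil_of_le (by omega))
        omega
      rw [pv_main n k hk (xs.drop k) ((0 : Int) + 1 + (xs.take k).length) _
        (by omega)
        (by rw [htk]
            push_cast
            rw [add_comm])]
      rw [pvLine, List.map_cons, pvJoinE_cons]
      simp [String.append_assoc]

-- ===== VERDICT (by name: the statement is the Claim_ definition above) =====
theorem bytes_to_asm_spec : Claim_equal_bytes_to_asm := by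
  intro data n e _ hpre
  unfold Spec_bytes_to_asm bytes_to_asm bytes_to_asm_alt
  obtain ⟨k, hk⟩ : ∃ k : Nat, n = (k : Int) + 1 := by
    refine ⟨(n - 1).toNat, ?_⟩
    unfold Pre_bytes_to_asm at hpre
    omega
  have hka : n.natAbs = k + 1 := by omega
  have hpc : (PySem.List.pyRange 0 (data.length : Int) n).map
      (fun j => PySem.List.slice data (some j) (some (j + n))) = pvChunks (k + 1) data := by
    rw [hk]; exact pv_port_chunks k data
  rw [hpc]
  rw [show ((PySem.List.enumerate data 0).foldl (fun asm p =>
      (if PySem.Int.mod p.1 n == 0 then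
        (if p.1 != 0 then asm ++ "\n" else asm) ++ "\t\t\t.byte " else asm) ++ pvItem p.2) "")
      = (PySem.List.enumerate data 0).foldl (pvStep n) "" from rfl]
  rw [pv_start n k hka]
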